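-- pv_equiv track=rewrite | github.com/y-titishev-infuse/bpa_ai-mode-google-search | ____selectors.py | _verify_json_integrity
-- ===== SOURCE A (Python) =====
-- def _verify_json_integrity(json_str: str) -> bool:
--     """Verify that all brackets and braces are properly balanced in JSON string.
--
--     Args:
--         json_str: JSON string to verify
--
--     Returns:
--         True if all brackets are balanced, False otherwise
--     """
--     if not json_str:
--         return False
--
--     brace_balance = 0  # { }
--     bracket_balance = 0  # [ ]
--     in_string = False
--     escape_next = False
--
--     for char in json_str:
--         # Handle escape sequences inside strings
--         if escape_next:
--             escape_next = False
--             continue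
--
--         if char == '\\' and in_string:
--             escape_next = True
--             continue
--
--         # Toggle string state on quotes (only unescaped)
--         if char == '"':
--             in_string = not in_string
--             continue
--
--         # Skip bracket counting if inside a string
--         if in_string:
--             continue
--
--         # Count braces and brackets
--         if char == '{':
--             brace_balance += 1
--         elif char == '}':
--             brace_balance -= 1
--         elif char == '[':
--             bracket_balance += 1
--         elif char == ']':
--             bracket_balance -= 1
--
--         # Early exit if balance goes negative (closing without opening)
--         if brace_balance < 0 or bracket_balance < 0:
--             return False
--
--     # All brackets must be closed and not inside a string
--     return brace_balance == 0 and bracket_balance == 0 and not in_string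
-- ===== SOURCE B (Python) =====
-- def _verify_json_integrity(json_str: str) -> bool:
--     if not json_str:
--         return False
--     # Pass 1: strip string contents, keeping only structural chars outside strings.
--     structural = []
--     in_string = False
--     escape = False
--     for ch in json_str:
--         if escape:
--             escape = False
--         elif ch == '\\' and in_string:
--             escape = True
--         elif ch == '"':
--             in_string = not in_string
--         elif not in_string and ch in '{}[]':
--             structural.append(ch)
--     if in_string:
--         return False
--     # Pass 2: independent counters with early negative exit.
--     brace = bracket = 0
--     for ch in structural:
--         if ch == '{':
--             brace += 1
--         elif ch == '}':
--             brace -= 1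
--         elif ch == '[':
--             bracket += 1
--         else:
--             bracket -= 1
--         if brace < 0 or bracket < 0:
--             return False
--     return brace == 0 and bracket == 0
-- ===== Notes on version B (the rewrite author's own statement) =====
-- stated objective: alternative
-- what changed: Single interleaved scan replaced by a two-pass decomposition: a string-stripping pass that collects only structural brackets outside strings, then a counting pass with two independent counters over the (typically tiny) reduced list.
import Mathlib
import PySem

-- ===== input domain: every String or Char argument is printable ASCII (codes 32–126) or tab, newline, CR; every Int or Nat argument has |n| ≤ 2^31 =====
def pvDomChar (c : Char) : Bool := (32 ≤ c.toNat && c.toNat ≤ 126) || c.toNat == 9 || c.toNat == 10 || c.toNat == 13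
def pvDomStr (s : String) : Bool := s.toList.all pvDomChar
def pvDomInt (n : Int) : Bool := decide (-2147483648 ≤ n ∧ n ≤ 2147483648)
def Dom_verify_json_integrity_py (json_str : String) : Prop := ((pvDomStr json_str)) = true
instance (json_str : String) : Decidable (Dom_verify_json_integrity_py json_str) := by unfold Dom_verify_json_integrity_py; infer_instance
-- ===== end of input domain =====

-- B: two-pass decomposition (strip string contents, then count brackets) instead of A's single interleaved scan; same return value, same cost.
-- ===== PORT A =====
-- Port B replaces A's single interleaved scan by two passes (strip strings, then count); same return value.
-- Literal transliteration of A's single loop: state (brace, bracket, in_string, escape).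
def goA : List Char → Int → Int → Bool → Bool → Bool
  | [], brace, bracket, inStr, _esc => brace == 0 && bracket == 0 && !inStr
  | c :: rest, brace, bracket, inStr, esc =>
    if esc then goA rest brace bracket inStr false
    else if c = '\\' ∧ inStr = true then goA rest brace bracket inStr true
    else if c = '"' then goA rest brace bracket (!inStr) esc
    else if inStr then goA rest brace bracket inStr esc
    else
      let brace' := if c = '{' then brace + 1 else if c = '}' then brace - 1 else brace
      let bracket' := if c = '[' then bracket + 1 else if c = ']' then bracket - 1 else bracket
      if brace' < 0 ∨ bracket' < 0 then false
      else goA rest brace' bracket' inStr esc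

def verify_json_integrity_py (json_str : String) : Bool :=
  if json_str = "" then false
  else goA json_str.toList 0 0 false false

-- ===== PORT B =====
-- Pass 1: keep only structural chars outside strings; also report whether we end inside a string.
def reduceB : List Char → Bool → Bool → List Char × Bool
  | [], inStr, _esc => ([], inStr)
  | c :: rest, inStr, esc =>
    if esc then reduceB rest inStr false
    else if c = '\\' ∧ inStr = true then reduceB rest inStr true
    else if c = '"' then reduceB rest (!inStr) esc
    else if inStr = false ∧ c ∈ ['{', '}', '[', ']'] then
      let p := reduceB rest inStr esc
      (c :: p.1, p.2)
    else reduceB rest inStr esc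

-- Pass 2: independent counters with early negative exit.
def countB : List Char → Int → Int → Bool
  | [], brace, bracket => brace == 0 && bracket == 0
  | c :: rest, brace, bracket =>
    let brace' := if c = '{' then brace + 1 else if c = '}' then brace - 1 else brace
    let bracket' := if c = '[' then bracket + 1 else if c = ']' then bracket - 1 else bracket
    if brace' < 0 ∨ bracket' < 0 then false
    else countB rest brace' bracket'

def verify_json_integrity_py_alt (json_str : String) : Bool :=
  if json_str = "" then false
  else
    let p := reduceB json_str.toList false false
    if p.2 then false else countB p.1 0 0

-- ===== PRECONDITION & SPEC =====
def Spec_verify_json_integrity_py (json_str : String) (out : Bool) : Prop := out = verify_json_integrity_py_alt json_str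
instance (json_str : String) (out : Bool) : Decidable (Spec_verify_json_integrity_py json_str out) := by unfold Spec_verify_json_integrity_py; infer_instance

-- ===== CLAIM =====
def Claim_equal_verify_json_integrity_py : Prop := ∀ (json_str : String), Dom_verify_json_integrity_py json_str → Spec_verify_json_integrity_py json_str (verify_json_integrity_py json_str)

-- ===== LEMMAS AND PROOFS =====
theorem goA_eq_two_pass (cs : List Char) : ∀ (brace bracket : Int) (inStr esc : Bool),
    0 ≤ brace → 0 ≤ bracket →
    goA cs brace bracket inStr esc =
      (if (reduceB cs inStr esc).2 then false else countB (reduceB cs inStr esc).1 brace bracket) := by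
  induction cs with
  | nil =>
    intro brace bracket inStr esc _ _
    cases inStr <;> simp [goA, reduceB, countB]
  | cons c rest ih =>
    intro brace bracket inStr esc hb hk
    by_cases hesc : esc = true
    · subst hesc; simp [goA, reduceB, ih _ _ _ _ hb hk]
    · replace hesc : esc = false := by cases esc <;> simp_all
      subst hesc
      by_cases hbs : c = '\\' ∧ inStr = true
      · simp [goA, reduceB, hbs, ih _ _ _ _ hb hk]
      · by_cases hq : c = '"'
        · simp [goA, reduceB, hq, ih _ _ _ _ hb hk]
        · by_cases hin : inStr = true
          · have hc : ¬ c = '\\' := fun h => hbs ⟨h, hin⟩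
            simp [goA, reduceB, hc, hq, hin, ih _ _ _ _ hb hk]
          · replace hin : inStr = false := by cases inStr <;> simp_all
            subst hin
            by_cases hstruct : c ∈ ['{', '}', '[', ']']
            · -- structural character: both sides apply the same update and negativity test
              simp only [List.mem_cons, List.not_mem_nil, or_false] at hstruct
              rcases hstruct with rfl | rfl | rfl | rfl
              · simp [goA, reduceB, countB,
                  show ¬((brace + 1 : Int) < 0 ∨ bracket < 0) from by omega]
                rw [ih _ _ _ _ (by omega) hk]
                cases hr : (reduceB rest false false).2 <;> simp [hr]
              · by_cases hneg : brace - 1 < 0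
                · simp [goA, reduceB, countB, show brace < 1 from by omega]
                · simp [goA, reduceB, countB, show ¬ brace < 1 from by omega,
                    show ¬ bracket < 0 from by omega]
                  rw [ih _ _ _ _ (by omega) hk]
                  cases hr : (reduceB rest false false).2 <;> simp [hr]
              · simp [goA, reduceB, countB,
                  show ¬(brace < 0 ∨ (bracket + 1 : Int) < 0) from by omega]
                rw [ih _ _ _ _ hb (by omega)]
                cases hr : (reduceB rest false false).2 <;> simp [hr]
              · by_cases hneg : bracket - 1 < 0
                · simp [goA, reduceB, countB, show bracket < 1 from by omega]
                · simp [goA, reduceB, countB, show ¬ brace < 0 from by omega,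
                    show ¬ bracket < 1 from by omega]
                  rw [ih _ _ _ _ hb (by omega)]
                  cases hr : (reduceB rest false false).2 <;> simp [hr]
            · -- non-structural outside string: A leaves counters, checks negativity (never fires)
              have h1 : ¬ c = '{' := by rintro rfl; simp at hstruct
              have h2 : ¬ c = '}' := by rintro rfl; simp at hstruct
              have h3 : ¬ c = '[' := by rintro rfl; simp at hstruct
              have h4 : ¬ c = ']' := by rintro rfl; simp at hstruct
              have hneg : ¬ (brace < 0 ∨ bracket < 0) := by omega
              simp [goA, reduceB, hq, hstruct, h1, h2, h3, h4, hneg,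
                ih _ _ _ _ hb hk]

-- ===== VERDICT =====
theorem verify_json_integrity_py_spec : Claim_equal_verify_json_integrity_py := by
  intro s _
  unfold Spec_verify_json_integrity_py verify_json_integrity_py verify_json_integrity_py_alt
  by_cases h : s = "" <;> simp [h, goA_eq_two_pass s.toList 0 0 false false (by norm_num) (by norm_num)]
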